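-- pv_equiv track=rewrite | github.com/MaxPett/ArUco-marker-FoundationPose-UR3e | evaluation/analysis_foundationPose.py | find_closest_timestamps
-- ===== SOURCE A (Python) =====
-- from bisect import bisect_left
--
-- def find_closest_timestamps(list_time_stamps, list_res):
--     # Ensure list_res is sorted for binary search
--     list_res.sort()
--     closest_timestamps = []
--
--     for ts in list_time_stamps:
--         # Find the position where ts would fit in the sorted list_res
--         pos = bisect_left(list_res, ts)
--
--         # Check neighbors to find the closest timestamp
--         if pos == 0:
--             closest_timestamps.append(list_res[0])
--         elif pos == len(list_res):
--             closest_timestamps.append(list_res[-1])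
--         else:
--             before = list_res[pos - 1]
--             after = list_res[pos]
--             # Choose the closest of the two
--             closest_timestamps.append(before if abs(ts - before) <= abs(ts - after) else after)
--     return closest_timestamps
-- ===== SOURCE B (Python) =====
-- from bisect import bisect_left
--
-- def find_closest_timestamps(list_time_stamps, list_res):
--     # Same in-place sort as A (preserves the observable mutation and tie order).
--     list_res.sort()
--     # Doubled midpoints of adjacent sorted values: a query's nearest index is the
--     # number of boundaries strictly below twice the query (bisect_left is strict,
--     # so equidistant ties pick the smaller element just like A's <=).
--     doubled_mids = [list_res[i] + list_res[i + 1] for i in range(len(list_res) - 1)]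
--     return [list_res[bisect_left(doubled_mids, 2 * ts)] for ts in list_time_stamps]
-- ===== Notes on version B (the rewrite author's own statement) =====
-- stated objective: alternative
-- what changed: Instead of binary-searching the values and comparing the two neighbors per query, B precomputes the doubled midpoints of adjacent sorted values once and answers each query directly as list_res[bisect_left(doubled_mids, 2*ts)] (bisect_left is strict, so equidistant ties pick the smaller element like A's <=), with no neighbor comparison.
import Mathlib
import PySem

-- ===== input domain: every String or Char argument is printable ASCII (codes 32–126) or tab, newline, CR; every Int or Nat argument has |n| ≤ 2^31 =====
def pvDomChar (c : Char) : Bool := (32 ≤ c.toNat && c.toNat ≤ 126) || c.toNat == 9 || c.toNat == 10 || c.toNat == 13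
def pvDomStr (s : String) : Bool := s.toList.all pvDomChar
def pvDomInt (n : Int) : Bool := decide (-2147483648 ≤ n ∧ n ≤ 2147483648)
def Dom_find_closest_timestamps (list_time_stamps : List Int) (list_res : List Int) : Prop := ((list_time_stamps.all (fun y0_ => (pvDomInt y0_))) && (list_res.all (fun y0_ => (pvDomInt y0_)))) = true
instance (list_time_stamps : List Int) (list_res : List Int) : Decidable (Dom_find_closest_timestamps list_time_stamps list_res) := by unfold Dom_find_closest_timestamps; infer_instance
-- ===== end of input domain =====

-- B precomputes the doubled midpoints of adjacent sorted values and answers each query as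
-- list_res[bisect_left(doubled_mids, 2*ts)], with no neighbor comparison (objective: alternative). Both A and B sort list_res in place; the equivalence proved
-- here is about the return value (the mutation is identical in both).

-- ===== PORT A =====
-- loop body of A: bisect_left on the sorted list, then inspect the neighbors.
-- list_res[0] / list_res[-1] raise IndexError on an empty list: Pre_ excludes that,
-- so the `.getD 0` default is never reached on admitted inputs.
def pvAChoice (s : List Int) (ts : Int) : Int :=
  let pos := PySem.List.bisectLeft s ts
  if pos = 0 then (PySem.List.pyGet? s 0).getD 0
  else if pos = s.length then (PySem.List.pyGet? s (-1)).getD 0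
  else
    let before := (PySem.List.pyGet? s ((pos : Int) - 1)).getD 0
    let after := (PySem.List.pyGet? s (pos : Int)).getD 0
    if (ts - before).natAbs ≤ (ts - after).natAbs then before else after

def find_closest_timestamps (list_time_stamps : List Int) (list_res : List Int) : List Int :=
  let s := PySem.List.sorted list_res (fun x => x)
  list_time_stamps.foldl (fun acc ts => acc ++ [pvAChoice s ts]) []

-- ===== PORT B =====
-- doubled_mids = [list_res[i] + list_res[i+1] for i in range(len(list_res)-1)]
def pvMids (s : List Int) : List Int :=
  (PySem.List.pyRange 0 ((s.length : Int) - 1) 1).map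
    (fun i => PySem.List.pyGetD s i 0 + PySem.List.pyGetD s (i + 1) 0)

-- body of B's comprehension: list_res[bisect_left(doubled_mids, 2*ts)].
-- list_res[k] raises IndexError on an empty list: Pre_ excludes that.
def pvBVal (s : List Int) (mids : List Int) (ts : Int) : Int :=
  (PySem.List.pyGet? s ((PySem.List.bisectLeft mids (2 * ts) : Nat) : Int)).getD 0

def find_closest_timestamps_alt (list_time_stamps : List Int) (list_res : List Int) : List Int :=
  let s := PySem.List.sorted list_res (fun x => x)
  let mids := pvMids s
  list_time_stamps.map (fun ts => pvBVal s mids ts)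

-- ===== PRECONDITION & SPEC =====
-- Pre_ excludes exactly the inputs where both Pythons raise IndexError:
-- an empty list_res with a nonempty list_time_stamps.
def Pre_find_closest_timestamps (list_time_stamps : List Int) (list_res : List Int) : Prop :=
  list_res ≠ [] ∨ list_time_stamps = []
instance (list_time_stamps : List Int) (list_res : List Int) : Decidable (Pre_find_closest_timestamps list_time_stamps list_res) := by unfold Pre_find_closest_timestamps; infer_instance

def pvWitness_find_closest_timestamps : List Int × List Int := ([7, -2], [3, 8, 3])

def Spec_find_closest_timestamps (list_time_stamps : List Int) (list_res : List Int) (out : List Int) : Prop := out = find_closest_timestamps_alt list_time_stamps list_res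
instance (list_time_stamps : List Int) (list_res : List Int) (out : List Int) : Decidable (Spec_find_closest_timestamps list_time_stamps list_res out) := by unfold Spec_find_closest_timestamps; infer_instance

-- ===== CLAIM (what is proved, stated in full; the proofs are below) =====
def Claim_equal_find_closest_timestamps : Prop := ∀ (list_time_stamps : List Int) (list_res : List Int), Dom_find_closest_timestamps list_time_stamps list_res → Pre_find_closest_timestamps list_time_stamps list_res → Spec_find_closest_timestamps list_time_stamps list_res (find_closest_timestamps list_time_stamps list_res)

-- ===== LEMMAS AND PROOFS =====

-- b is the element of s of minimal |ts - ·|, the smallest one on ties.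
def pvIsBest (ts : Int) (s : List Int) (b : Int) : Prop :=
  b ∈ s ∧ ∀ r ∈ s, (ts - b).natAbs < (ts - r).natAbs ∨
    ((ts - b).natAbs = (ts - r).natAbs ∧ b ≤ r)

theorem pvIsBest_unique (ts : Int) (s : List Int) (b b' : Int)
    (h : pvIsBest ts s b) (h' : pvIsBest ts s b') : b = b' := by
  rcases h with ⟨hm, hall⟩
  rcases h' with ⟨hm', hall'⟩
  rcases hall b' hm' with h1 | h1 <;> rcases hall' b hm with h2 | h2 <;> omega

theorem pvPairwise_getElem_le (s : List Int) (hp : s.Pairwise (· ≤ ·))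
    {i j : Nat} (hij : i ≤ j) (hj : j < s.length) : s[i]'(by omega) ≤ s[j] := by
  rcases Nat.lt_or_ge i j with h | h
  · exact List.pairwise_iff_getElem.mp hp i j (by omega) hj h
  · have : i = j := by omega
    subst this; rfl

theorem pvAChoice_isBest (s : List Int) (ts : Int)
    (hp : s.Pairwise (· ≤ ·)) (hne : s ≠ []) : pvIsBest ts s (pvAChoice s ts) := by
  have hlen : 0 < s.length := List.length_pos_iff.mpr hne
  obtain ⟨hposle, hlt, hge⟩ := PySem.List.bisectLeft_spec s ts hp
  set pos := PySem.List.bisectLeft s ts with hposdef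
  by_cases h0 : pos = 0
  · -- pos == 0 : append list_res[0]
    have hval : pvAChoice s ts = s[0] := by
      simp [pvAChoice, ← hposdef, h0, PySem.List.pyGet?_zero,
        List.getElem?_eq_getElem hlen]
    rw [hval]
    refine ⟨List.getElem_mem hlen, ?_⟩
    intro r hr
    obtain ⟨j, hj, rfl⟩ := List.mem_iff_getElem.mp hr
    have h1 : ts ≤ s[0] := hge 0 hlen (by omega)
    have h2 : ts ≤ s[j] := hge j hj (by omega)
    have h3 : s[0] ≤ s[j] := pvPairwise_getElem_le s hp (Nat.zero_le j) hj
    omega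
  · by_cases hN : pos = s.length
    · -- pos == len : append list_res[-1]
      have hval : pvAChoice s ts = s[s.length - 1] := by
        simp [pvAChoice, ← hposdef, hN, hne, PySem.List.pyGet?_neg_one,
          List.getLast?_eq_getElem?, List.getElem?_eq_getElem (by omega : s.length - 1 < s.length)]
      rw [hval]
      refine ⟨List.getElem_mem (by omega), ?_⟩
      intro r hr
      obtain ⟨j, hj, rfl⟩ := List.mem_iff_getElem.mp hr
      have h1 : s[s.length - 1] < ts := hlt (s.length - 1) (by omega) (by omega)
      have h2 : s[j] < ts := hlt j hj (by omega)
      have h3 : s[j] ≤ s[s.length - 1] := pvPairwise_getElem_le s hp (by omega) (by omega)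
      omega
    · -- middle: compare neighbors before = s[pos-1], after = s[pos]
      have hpos1 : 1 ≤ pos := by omega
      have hposlt : pos < s.length := by omega
      have hbefore : (PySem.List.pyGet? s ((pos : Int) - 1)).getD 0 = s[pos - 1] := by
        have : ((pos : Int) - 1) = ((pos - 1 : Nat) : Int) := by omega
        rw [this, PySem.List.pyGet?_natCast,
          List.getElem?_eq_getElem (by omega : pos - 1 < s.length)]
        rfl
      have hafter : (PySem.List.pyGet? s (pos : Int)).getD 0 = s[pos] := by
        rw [PySem.List.pyGet?_natCast, List.getElem?_eq_getElem hposlt]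
        rfl
      have hb : s[pos - 1] < ts := hlt (pos - 1) (by omega) (by omega)
      have ha : ts ≤ s[pos] := hge pos hposlt (by omega)
      have hval : pvAChoice s ts =
          (if (ts - s[pos - 1]).natAbs ≤ (ts - s[pos]).natAbs then s[pos - 1] else s[pos]) := by
        simp only [pvAChoice, ← hposdef, if_neg h0, if_neg hN, hbefore, hafter]
      have hkey : ∀ r ∈ s, (r ≤ s[pos - 1] ∧ r < ts) ∨ (s[pos] ≤ r ∧ ts ≤ r) := by
        intro r hr
        obtain ⟨j, hj, rfl⟩ := List.mem_iff_getElem.mp hr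
        rcases Nat.lt_or_ge j pos with hcase | hcase
        · exact Or.inl ⟨pvPairwise_getElem_le s hp (by omega) (by omega),
            hlt j hj (by omega)⟩
        · exact Or.inr ⟨pvPairwise_getElem_le s hp (by omega) hj, hge j hj (by omega)⟩
      rw [hval]
      by_cases hc : (ts - s[pos - 1]).natAbs ≤ (ts - s[pos]).natAbs
      · rw [if_pos hc]
        refine ⟨List.getElem_mem (by omega), ?_⟩
        intro r hr
        rcases hkey r hr with ⟨h1, h2⟩ | ⟨h1, h2⟩ <;> omega
      · rw [if_neg hc]
        refine ⟨List.getElem_mem hposlt, ?_⟩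
        intro r hr
        rcases hkey r hr with ⟨h1, h2⟩ | ⟨h1, h2⟩ <;> omega

-- the midpoint list: length and elements
theorem pvMids_length (s : List Int) : (pvMids s).length = s.length - 1 := by
  simp [pvMids, PySem.List.length_pyRange_one]

theorem pvMids_getElem (s : List Int) (i : Nat) (hi : i < (pvMids s).length) :
    (pvMids s)[i] = s[i]'(by rw [pvMids_length] at hi; omega) +
      s[i + 1]'(by rw [pvMids_length] at hi; omega) := by
  have hi' := hi
  rw [pvMids_length] at hi'
  have h1 : i + 1 < s.length := by omega
  have h0 : i < s.length := by omega
  simp only [pvMids, List.getElem_map]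
  rw [PySem.List.getElem_pyRange_one]
  have e1 : ((0 : Int) + (i : Nat)) = ((i : Nat) : Int) := by omega
  rw [e1, PySem.List.pyGetD_natCast]
  have e2 : (((i : Nat) : Int) + 1) = (((i + 1 : Nat)) : Int) := by omega
  rw [e2, PySem.List.pyGetD_natCast]
  rw [List.getD_eq_getElem s 0 h0, List.getD_eq_getElem s 0 h1]

-- stepping left of k toward k weakly decreases the distance, strictly unless values are equal
theorem pvChainL (s : List Int) (ts : Int) (hp : s.Pairwise (· ≤ ·)) (k : Nat)
    (hk : k < s.length)
    (hlt : ∀ i, i < k → (h : i + 1 < s.length) → s[i]'(by omega) + s[i + 1] < 2 * ts) :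
    ∀ d j, j + d = k → (hj : j < s.length) →
      (ts - s[k]).natAbs < (ts - s[j]).natAbs ∨
        ((ts - s[k]).natAbs = (ts - s[j]).natAbs ∧ s[k] = s[j]) := by
  intro d
  induction d with
  | zero =>
    intro j hjk hj
    have : j = k := by omega
    subst this
    exact Or.inr ⟨rfl, rfl⟩
  | succ d ih =>
    intro j hjk hj
    have hj1 : j + 1 < s.length := by omega
    have hstep := hlt j (by omega) hj1
    have hle : s[j] ≤ s[j + 1] := pvPairwise_getElem_le s hp (by omega) hj1
    have hih := ih (j + 1) (by omega) hj1
    omega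

-- stepping right from k weakly increases the distance
theorem pvChainR (s : List Int) (ts : Int) (hp : s.Pairwise (· ≤ ·)) (k : Nat)
    (hk : k < s.length)
    (hge : ∀ i, k ≤ i → (h : i + 1 < s.length) → 2 * ts ≤ s[i]'(by omega) + s[i + 1]) :
    ∀ d j, j = k + d → (hj : j < s.length) →
      (ts - s[k]).natAbs ≤ (ts - s[j]).natAbs := by
  intro d
  induction d with
  | zero =>
    intro j hjk hj
    have : j = k := by omega
    subst this; rfl
  | succ d ih =>
    intro j hjk hj
    have hi1 : k + d + 1 < s.length := by omega
    have hih := ih (k + d) (by omega) (by omega)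
    have hstep := hge (k + d) (by omega) hi1
    have hle : s[k + d]'(by omega) ≤ s[k + d + 1] := pvPairwise_getElem_le s hp (by omega) hi1
    have : j = k + d + 1 := by omega
    subst this
    omega

theorem pvBVal_isBest (s : List Int) (ts : Int)
    (hp : s.Pairwise (· ≤ ·)) (hne : s ≠ []) : pvIsBest ts s (pvBVal s (pvMids s) ts) := by
  have hlen : 0 < s.length := List.length_pos_iff.mpr hne
  have hmids_pw : (pvMids s).Pairwise (· ≤ ·) := by
    rw [List.pairwise_iff_getElem]
    intro i j hi hj hij
    rw [pvMids_getElem s i hi, pvMids_getElem s j hj]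
    have hjlen : j + 1 < s.length := by have := pvMids_length s; omega
    have h1 : s[i]'(by omega) ≤ s[j]'(by omega) := pvPairwise_getElem_le s hp (by omega) (by omega)
    have h2 : s[i + 1]'(by omega) ≤ s[j + 1] := pvPairwise_getElem_le s hp (by omega) hjlen
    omega
  obtain ⟨hkle, hml, hmg⟩ := PySem.List.bisectLeft_spec (pvMids s) (2 * ts) hmids_pw
  set kN := PySem.List.bisectLeft (pvMids s) (2 * ts) with hkdef
  have hkn : kN < s.length := by have := pvMids_length s; omega
  have hlt : ∀ i, i < kN → (h : i + 1 < s.length) → s[i]'(by omega) + s[i + 1] < 2 * ts := by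
    intro i hik h1
    have hi : i < (pvMids s).length := by omega
    have := hml i hi (by omega)
    rw [pvMids_getElem s i hi] at this
    exact this
  have hge : ∀ i, kN ≤ i → (h : i + 1 < s.length) → 2 * ts ≤ s[i]'(by omega) + s[i + 1] := by
    intro i hik h1
    have hi : i < (pvMids s).length := by rw [pvMids_length]; omega
    have := hmg i hi (by omega)
    rw [pvMids_getElem s i hi] at this
    omega
  -- the value looked up by B is s[kN]
  have hval : pvBVal s (pvMids s) ts = s[kN] := by
    unfold pvBVal
    rw [← hkdef, PySem.List.pyGet?_natCast, List.getElem?_eq_getElem hkn]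
    rfl
  rw [hval]
  refine ⟨List.getElem_mem hkn, ?_⟩
  intro r hr
  obtain ⟨j, hj, rfl⟩ := List.mem_iff_getElem.mp hr
  rcases Nat.lt_or_ge kN j with hcase | hcase
  · have := pvChainR s ts hp kN hkn hge (j - kN) j (by omega) hj
    have hle : s[kN] ≤ s[j] := pvPairwise_getElem_le s hp (by omega) hj
    omega
  · rcases pvChainL s ts hp kN hkn hlt (kN - j) j (by omega) hj with h | ⟨h1, h2⟩
    · exact Or.inl h
    · exact Or.inr ⟨h1, le_of_eq h2⟩

theorem pvChoice_eq_val (s : List Int) (ts : Int)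
    (hp : s.Pairwise (· ≤ ·)) (hne : s ≠ []) : pvAChoice s ts = pvBVal s (pvMids s) ts :=
  pvIsBest_unique ts s _ _ (pvAChoice_isBest s ts hp hne) (pvBVal_isBest s ts hp hne)

-- ===== VERDICT (by name: the statement is the Claim_ definition above) =====
theorem find_closest_timestamps_spec : Claim_equal_find_closest_timestamps := by
  intro tss res _ hpre
  unfold Spec_find_closest_timestamps find_closest_timestamps find_closest_timestamps_alt
  simp only [PySem.List.foldl_append_singleton_eq_map, List.nil_append]
  rcases hpre with hres | htss
  · have hne : PySem.List.sorted res (fun x => x) ≠ [] := by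
      intro h; exact hres ((PySem.List.sorted_eq_nil_iff res _ false).mp h)
    exact List.map_congr_left fun ts _ =>
      pvChoice_eq_val _ ts (PySem.List.sorted_pairwise res (fun x => x)) hne
  · subst htss; rfl
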